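-- pv_equiv track=rewrite | github.com/darkshoxx/Trilobyters | TrilobyteEngines/mirco_2.py | stat_eval
-- ===== SOURCE A (Python) =====
-- def stat_eval(position):
--     score = 0
--     empty = 0
--     for row in position:
--         for entry in row:
--             if entry == 1:
--                 score += 1
--             elif entry == 2:
--                 score -= 1
--             else:
--                 empty +=1
--     return score, empty
-- ===== SOURCE B (Python) =====
-- def stat_eval(position):
--     cells = [e for row in position for e in row]
--
--     def solve(cells):
--         n = len(cells)
--         if n == 0:
--             return (0, 0)
--         if n == 1:
--             e = cells[0]
--             if e == 1:
--                 return (1, 0)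
--             if e == 2:
--                 return (-1, 0)
--             return (0, 1)
--         mid = n // 2
--         s1, e1 = solve(cells[:mid])
--         s2, e2 = solve(cells[mid:])
--         return (s1 + s2, e1 + e2)
--
--     return solve(cells)
-- ===== Notes on version B (the rewrite author's own statement) =====
-- stated objective: alternative
-- what changed: Replaces A's single-pass if/elif accumulator loop with a divide-and-conquer tree reduction: flatten the grid, split recursively in halves down to single cells, and combine (score, empty) pairs by componentwise addition.
import Mathlib
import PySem

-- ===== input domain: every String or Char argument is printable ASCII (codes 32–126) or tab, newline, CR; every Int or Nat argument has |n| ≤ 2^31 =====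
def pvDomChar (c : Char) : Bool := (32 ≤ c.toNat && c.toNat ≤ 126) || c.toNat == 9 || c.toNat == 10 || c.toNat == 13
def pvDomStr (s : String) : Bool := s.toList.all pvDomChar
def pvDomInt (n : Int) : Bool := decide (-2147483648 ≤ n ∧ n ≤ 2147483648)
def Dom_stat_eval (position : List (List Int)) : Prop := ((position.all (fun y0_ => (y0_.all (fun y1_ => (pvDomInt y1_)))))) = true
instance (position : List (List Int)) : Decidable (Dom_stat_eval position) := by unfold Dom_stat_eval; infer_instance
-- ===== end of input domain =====

-- B replaces A's single-pass accumulator loop with a divide-and-conquer halving reduction over the flattened grid (alternative decomposition, same result).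


-- ===== PORT A =====
def stat_eval (position : List (List Int)) : Int × Int :=
  let init : Int × Int := (0, 0)
  position.foldl
    (fun st row =>
      row.foldl
        (fun st entry =>
          if entry = 1 then (st.1 + 1, st.2)
          else if entry = 2 then (st.1 - 1, st.2)
          else (st.1, st.2 + 1))
        st)
    init

-- ===== PORT B =====
-- divide-and-conquer over the flattened cell list (cells[:mid] / cells[mid:] are take/drop)
def stat_eval_solve (cells : List Int) : Int × Int :=
  if h0 : cells.length = 0 then (0, 0)
  else if h1 : cells.length = 1 then
    match cells with
    | e :: _ =>
      if e = 1 then (1, 0)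
      else if e = 2 then (-1, 0)
      else (0, 1)
    | [] => (0, 0)
  else
    let mid := cells.length / 2
    let p1 := stat_eval_solve (cells.take mid)
    let p2 := stat_eval_solve (cells.drop mid)
    (p1.1 + p2.1, p1.2 + p2.2)
termination_by cells.length
decreasing_by
  · simp [List.length_take]; omega
  · simp [List.length_drop]; omega

def stat_eval_alt (position : List (List Int)) : Int × Int :=
  stat_eval_solve (position.flatten)

-- ===== PRECONDITION & SPEC =====
def Spec_stat_eval (position : List (List Int)) (out : Int × Int) : Prop := out = stat_eval_alt position
instance (position : List (List Int)) (out : Int × Int) : Decidable (Spec_stat_eval position out) := by unfold Spec_stat_eval; infer_instance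

-- ===== CLAIM (what is proved, stated in full; the proofs are below) =====
def Claim_equal_stat_eval : Prop := ∀ (position : List (List Int)), Dom_stat_eval position → Spec_stat_eval position (stat_eval position)

-- ===== LEMMAS AND PROOFS =====

-- reference value: the (score, empty) pair of a flat cell list, defined structurally
def gpair : List Int → Int × Int
  | [] => (0, 0)
  | e :: t =>
    let p := gpair t
    if e = 1 then (p.1 + 1, p.2)
    else if e = 2 then (p.1 - 1, p.2)
    else (p.1, p.2 + 1)

theorem gpair_append (a b : List Int) :
    gpair (a ++ b) = ((gpair a).1 + (gpair b).1, (gpair a).2 + (gpair b).2) := by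
  induction a with
  | nil => simp [gpair]
  | cons e t ih =>
    simp only [List.cons_append, gpair, ih]
    split_ifs <;> simp <;> ring_nf

-- A's inner fold over one row in terms of gpair
theorem fold_row (row : List Int) (st : Int × Int) :
    row.foldl
      (fun st entry =>
        if entry = 1 then (st.1 + 1, st.2)
        else if entry = 2 then (st.1 - 1, st.2)
        else (st.1, st.2 + 1))
      st
    = (st.1 + (gpair row).1, st.2 + (gpair row).2) := by
  induction row generalizing st with
  | nil => simp [gpair]
  | cons e t ih =>
    simp only [List.foldl_cons, ih, gpair]
    split_ifs <;> simp <;> ring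

-- A's outer fold over the rows in terms of gpair of the flattened grid
theorem fold_grid (l : List (List Int)) (st : Int × Int) :
    l.foldl
      (fun st row =>
        row.foldl
          (fun st entry =>
            if entry = 1 then (st.1 + 1, st.2)
            else if entry = 2 then (st.1 - 1, st.2)
            else (st.1, st.2 + 1))
          st)
      st
    = (st.1 + (gpair l.flatten).1, st.2 + (gpair l.flatten).2) := by
  induction l generalizing st with
  | nil => simp [gpair]
  | cons r t ih =>
    rw [List.foldl_cons, fold_row, ih]
    simp only [List.flatten_cons, gpair_append, Prod.mk.injEq]
    omega

-- A equals gpair of the flattened grid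
theorem stat_eval_eq_gpair (position : List (List Int)) :
    stat_eval position = gpair position.flatten := by
  unfold stat_eval
  rw [fold_grid]
  simp

-- B's divide-and-conquer equals gpair
theorem solve_eq_gpair : ∀ (n : Nat) (l : List Int), l.length ≤ n → stat_eval_solve l = gpair l := by
  intro n
  induction n with
  | zero =>
    intro l hl
    have : l = [] := List.length_eq_zero_iff.mp (Nat.le_zero.mp hl)
    subst this
    simp [stat_eval_solve, gpair]
  | succ n ih =>
    intro l hl
    rw [stat_eval_solve]
    by_cases h0 : l.length = 0
    · have : l = [] := List.length_eq_zero_iff.mp h0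
      subst this; simp [gpair]
    · by_cases h1 : l.length = 1
      · simp only [h1, dite_true]
        match l, h1 with
        | [e], _ => simp [gpair]
      · simp only [h0, h1, dite_false]
        have hmidlt : l.length / 2 < l.length := by omega
        have hmidpos : 1 ≤ l.length / 2 := by omega
        have ht : (l.take (l.length / 2)).length ≤ n := by
          simp [List.length_take]; omega
        have hd : (l.drop (l.length / 2)).length ≤ n := by
          simp [List.length_drop]; omega
        rw [ih _ ht, ih _ hd]
        have := gpair_append (l.take (l.length / 2)) (l.drop (l.length / 2))
        rw [List.take_append_drop] at this
        rw [this]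

-- ===== VERDICT (by name: the statement is the Claim_ definition above) =====
theorem stat_eval_spec : Claim_equal_stat_eval := by
  intro p _
  unfold Spec_stat_eval stat_eval_alt
  rw [stat_eval_eq_gpair, solve_eq_gpair p.flatten.length p.flatten (le_refl _)]
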